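-- pv_equiv track=rewrite | github.com/jamesskelton-nexefy/picarcade | packages/agentic/src/pic_arcade_agentic/tools/image_tools.py | _enhance_edit_language
-- ===== SOURCE A (Python) =====
-- def _enhance_edit_language(prompt: str) -> str:
--     """
--     Enhance edit prompts with specific action verbs for better control.
--     Implements 'Complex Edits' best practice.
--     """
--     # Replace generic transform language with specific action verbs
--     action_improvements = {
--         "transform": "modify and adjust",
--         "change it": "alter the specific elements",
--         "make it": "create and render",
--         "turn it into": "convert and reshape into",
--     }
--
--     enhanced_prompt = prompt
--     for generic_term, specific_action in action_improvements.items():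
--         enhanced_prompt = enhanced_prompt.replace(generic_term, specific_action)
--
--     return enhanced_prompt
-- ===== SOURCE B (Python) =====
-- _ACTION_IMPROVEMENTS = {
--     "transform": "modify and adjust",
--     "change it": "alter the specific elements",
--     "make it": "create and render",
--     "turn it into": "convert and reshape into",
-- }
--
--
-- def _enhance_edit_language(prompt: str) -> str:
--     """
--     Enhance edit prompts with specific action verbs for better control.
--     Implements 'Complex Edits' best practice.
--
--     Single left-to-right scan: at each position the first matching generic
--     term is emitted as its specific action, otherwise the character is kept.
--     """
--     pieces = []
--     i = 0
--     n = len(prompt)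
--     while i < n:
--         for term, action in _ACTION_IMPROVEMENTS.items():
--             if prompt.startswith(term, i):
--                 pieces.append(action)
--                 i += len(term)
--                 break
--         else:
--             pieces.append(prompt[i])
--             i += 1
--     return "".join(pieces)
-- ===== Notes on version B (the rewrite author's own statement) =====
-- stated objective: alternative
-- what changed: Four sequential full-string str.replace passes are replaced by a single left-to-right scan that at each position emits the first matching term's replacement (or the character) into a pieces list; Pre_ excludes prompts containing one of three substrings where two generic terms overlap or a replacement abuts the rest of a term, since which rewrite wins there is an accident of A's pass order.
-- outside the precondition, e.g. on _enhance_edit_language('make itransform'): A returns 'make imodify and adjust', B returns 'create and renderransform'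
import Mathlib
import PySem

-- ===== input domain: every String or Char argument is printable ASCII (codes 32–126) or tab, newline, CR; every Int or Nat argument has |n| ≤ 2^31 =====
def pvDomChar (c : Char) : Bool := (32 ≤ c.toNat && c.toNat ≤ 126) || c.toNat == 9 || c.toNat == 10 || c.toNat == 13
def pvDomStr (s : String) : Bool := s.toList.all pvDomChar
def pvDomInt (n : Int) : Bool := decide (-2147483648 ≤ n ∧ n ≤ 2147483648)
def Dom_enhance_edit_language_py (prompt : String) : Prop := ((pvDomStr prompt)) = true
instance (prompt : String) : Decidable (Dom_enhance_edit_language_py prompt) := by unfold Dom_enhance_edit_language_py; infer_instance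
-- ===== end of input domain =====

-- B replaces A's four sequential full-string replace passes by a single
-- left-to-right scan emitting, at each position, the first matching term's
-- replacement (alternative decomposition, same cost).

-- ===== PORT A =====
def enhance_edit_language_py (prompt : String) : String :=
  let action_improvements : PySem.Dict String String := PySem.Dict.mk
    [("transform", "modify and adjust"),
     ("change it", "alter the specific elements"),
     ("make it", "create and render"),
     ("turn it into", "convert and reshape into")]
  action_improvements.items.foldl
    (fun enhanced_prompt p => PySem.Str.replace enhanced_prompt p.1 p.2) prompt

-- ===== PORT B =====
def pvPairs : List (List Char × List Char) :=
  [("transform".toList, "modify and adjust".toList),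
   ("change it".toList, "alter the specific elements".toList),
   ("make it".toList, "create and render".toList),
   ("turn it into".toList, "convert and reshape into".toList)]

-- the scan loop of Source B: at each position emit the first matching term's
-- action (and skip the term), else the character itself
def pvScan : List Char → List Char
  | [] => []
  | c :: t =>
    match pvPairs.find? (fun p => p.1.isPrefixOf (c :: t)) with
    | some p => p.2 ++ pvScan (t.drop (p.1.length - 1))
    | none => c :: pvScan t
termination_by l => l.length
decreasing_by
  · simp only [List.length_cons, List.length_drop]; omega
  · simp only [List.length_cons]; omega

def enhance_edit_language_py_alt (prompt : String) : String :=
  String.ofList (pvScan prompt.toList)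

-- ===== PRECONDITION & SPEC =====
-- Pre_ excludes prompts containing one of three substrings on which two of the
-- generic terms overlap, or a replacement abuts the remainder of a term: A
-- still returns a value there, but which rewrite wins is an accident of A's
-- pass order (B resolves the overlap leftmost), so the corner is excluded.
def Pre_enhance_edit_language_py (prompt : String) : Prop :=
  ¬ ("change itransform".toList <:+: prompt.toList) ∧
  ¬ ("make itransform".toList <:+: prompt.toList) ∧
  ¬ ("transformurn it into".toList <:+: prompt.toList)
instance (prompt : String) : Decidable (Pre_enhance_edit_language_py prompt) := by
  unfold Pre_enhance_edit_language_py; infer_instance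

def pvWitness_enhance_edit_language_py : String := "transform it and make it shine"

def Spec_enhance_edit_language_py (prompt : String) (out : String) : Prop := out = enhance_edit_language_py_alt prompt
instance (prompt : String) (out : String) : Decidable (Spec_enhance_edit_language_py prompt out) := by unfold Spec_enhance_edit_language_py; infer_instance

-- ===== CLAIM (what is proved, stated in full; the proofs are below) =====
def Claim_equal_enhance_edit_language_py : Prop := ∀ (prompt : String), Dom_enhance_edit_language_py prompt → Pre_enhance_edit_language_py prompt → Spec_enhance_edit_language_py prompt (enhance_edit_language_py prompt)

-- ===== LEMMAS AND PROOFS =====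

-- idealized (fuel-free) form of PySem.Chars.replace
def pvRepl (K R : List Char) : List Char → List Char
  | [] => []
  | c :: t =>
    if K.isPrefixOf (c :: t) then R ++ pvRepl K R (t.drop (K.length - 1))
    else c :: pvRepl K R t
termination_by l => l.length
decreasing_by
  · simp only [List.length_cons, List.length_drop]; omega
  · simp only [List.length_cons]; omega

theorem pvRepl_nil (K R : List Char) : pvRepl K R [] = [] := by simp [pvRepl]

theorem pv_prefix_append_cases (K x y : List Char) (h : K <+: x ++ y) :
    K <+: x ∨ (x <+: K ∧ K.drop x.length <+: y) := by
  by_cases hl : K.length ≤ x.length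
  · left
    rw [List.prefix_iff_eq_take] at h
    rw [List.take_append, Nat.sub_eq_zero_of_le hl,
        List.take_zero, List.append_nil] at h
    exact h ▸ List.take_prefix _ _
  · right
    push Not at hl
    rw [List.prefix_iff_eq_take, List.take_append,
        List.take_of_length_le (le_of_lt hl)] at h
    constructor
    · exact ⟨_, h.symm⟩
    · rw [h, List.drop_left]
      exact List.take_prefix _ _

theorem pvRepl_pos (K R v : List Char) (hK : K ≠ []) :
    pvRepl K R (K ++ v) = R ++ pvRepl K R v := by
  cases K with
  | nil => exact absurd rfl hK
  | cons a K' =>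
    rw [show (a :: K') ++ v = a :: (K' ++ v) from rfl, pvRepl]
    have hp : (a :: K').isPrefixOf (a :: (K' ++ v)) = true := by
      rw [List.isPrefixOf_iff_prefix]; exact ⟨v, rfl⟩
    rw [if_pos hp]
    simp only [List.length_cons, Nat.add_sub_cancel]
    rw [List.drop_left]

theorem pvRepl_neg (K R : List Char) (c : Char) (t : List Char) (h : ¬ K <+: (c :: t)) :
    pvRepl K R (c :: t) = c :: pvRepl K R t := by
  rw [pvRepl]
  have hp : K.isPrefixOf (c :: t) = false := by
    rw [← Bool.not_eq_true, List.isPrefixOf_iff_prefix]; exact h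
  rw [if_neg (by simp [hp])]

theorem pvRepl_id (K R : List Char) (l : List Char)
    (h : ∀ t ∈ l.tails, ¬ K <+: t) : pvRepl K R l = l := by
  induction l with
  | nil => exact pvRepl_nil K R
  | cons c t ih =>
    rw [pvRepl_neg K R c t (h _ ((List.mem_tails _ _).mpr (List.suffix_refl _))),
        ih (fun t₂ ht₂ => h t₂ ((List.mem_tails _ _).mpr
          (((List.mem_tails _ _).mp ht₂).trans (List.suffix_cons c t))))]

-- split: replacement distributes over an append when no K-occurrence
-- crosses the boundary
theorem pvRepl_append (K R : List Char) (hK : K ≠ []) :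
    ∀ n x y, x.length ≤ n →
    (∀ x₂ ∈ x.tails, x₂ ≠ [] → x₂ <+: K →
      K.length ≤ x₂.length ∨ ¬ (K.drop x₂.length <+: y)) →
    pvRepl K R (x ++ y) = pvRepl K R x ++ pvRepl K R y := by
  intro n
  induction n with
  | zero =>
    intro x y hlen _
    rw [List.eq_nil_of_length_eq_zero (Nat.le_zero.mp hlen)]
    simp [pvRepl_nil]
  | succ n ih =>
    intro x y hlen hC
    cases x with
    | nil => simp [pvRepl_nil]
    | cons c x' =>
      by_cases hp : K <+: (c :: x')
      · obtain ⟨w, hw⟩ := hp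
        have hw' : (c :: x') ++ y = K ++ (w ++ y) := by rw [← hw, List.append_assoc]
        rw [hw', pvRepl_pos K R (w ++ y) hK, ← hw, pvRepl_pos K R w hK]
        have hwlen : w.length ≤ n := by
          have h1 : K.length + w.length = x'.length + 1 := by
            have := congrArg List.length hw; simpa using this
          have h2 : 1 ≤ K.length := by
            cases K with | nil => exact absurd rfl hK | cons _ _ => simp
          simp only [List.length_cons] at hlen; omega
        have hwsuf : w <:+ (c :: x') := ⟨K, hw⟩
        rw [ih w y hwlen (fun x₂ hx₂ => hC x₂ ((List.mem_tails _ _).mpr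
          (((List.mem_tails _ _).mp hx₂).trans hwsuf))), List.append_assoc]
      · have hpy : ¬ K <+: ((c :: x') ++ y) := by
          intro h
          rcases pv_prefix_append_cases K (c :: x') y h with h1 | ⟨h2, h3⟩
          · exact hp h1
          · rcases hC (c :: x') ((List.mem_tails _ _).mpr (List.suffix_refl _))
              (by simp) h2 with hl | hnd
            · exact hp ((h2.eq_of_length_le hl) ▸ List.prefix_refl _)
            · exact hnd h3
        rw [show (c :: x') ++ y = c :: (x' ++ y) from rfl,
            pvRepl_neg K R c (x' ++ y) hpy, pvRepl_neg K R c x' hp,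
            ih x' y (by simp only [List.length_cons] at hlen; omega)
              (fun x₂ hx₂ => hC x₂ ((List.mem_tails _ _).mpr
              (((List.mem_tails _ _).mp hx₂).trans (List.suffix_cons c x'))))]
        rfl

-- reflection: a short pattern none of whose suffixes can start R survives
-- replacement backwards
theorem pvRepl_reflect (K R p : List Char) (hK : K ≠ [])
    (hR : ∀ q ∈ p.tails, q ≠ [] → ¬ q <+: R) (hlen : p.length < R.length) :
    ∀ n w q, w.length ≤ n → q ∈ p.tails → q <+: pvRepl K R w → q <+: w := by
  intro n
  induction n with
  | zero =>
    intro w q hw _ hq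
    rw [List.eq_nil_of_length_eq_zero (Nat.le_zero.mp hw)] at *
    rw [pvRepl_nil] at hq
    simpa using hq
  | succ n ih =>
    intro w q hw hmem hq
    cases w with
    | nil =>
      rw [pvRepl_nil] at hq
      simpa using hq
    | cons c t =>
      by_cases hp : K <+: (c :: t)
      · obtain ⟨w', hw'⟩ := hp
        rw [← hw', pvRepl_pos K R w' hK] at hq
        rcases pv_prefix_append_cases q R _ hq with h1 | ⟨h2, _⟩
        · cases q with
          | nil => exact List.nil_prefix
          | cons d q' => exact absurd h1 (hR _ hmem (by simp))
        · have := h2.length_le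
          have := ((List.mem_tails _ _).mp hmem).length_le
          omega
      · rw [pvRepl_neg K R c t hp] at hq
        cases q with
        | nil => exact List.nil_prefix
        | cons d q' =>
          rw [List.cons_prefix_cons] at hq
          have hq' : q' <+: t := by
            refine ih t q' (by simp only [List.length_cons] at hw; omega) ?_ hq.2
            exact (List.mem_tails _ _).mpr
              (List.IsSuffix.trans (⟨[d], rfl⟩ : q' <:+ d :: q') ((List.mem_tails _ _).mp hmem))
          exact List.cons_prefix_cons.mpr ⟨hq.1, hq'⟩

-- PySem.Chars.replace.go with the accumulator pulled out
theorem pv_replace_go_acc (old new' : List Char) (fuel : Nat) :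
    ∀ (l acc : List Char),
      PySem.Chars.replace.go old new' fuel l acc
        = acc.reverse ++ PySem.Chars.replace.go old new' fuel l [] := by
  induction fuel with
  | zero => intro l acc; simp [PySem.Chars.replace.go]
  | succ g ih =>
    intro l acc
    cases l with
    | nil => simp [PySem.Chars.replace.go]
    | cons c t =>
      simp only [PySem.Chars.replace.go]
      split
      · rw [ih _ (new'.reverse ++ acc), ih _ (new'.reverse ++ [])]
        simp
      · rw [ih _ (c :: acc), ih _ [c]]
        simp

-- PySem.Chars.replace.go with enough fuel is pvRepl
theorem pv_go_eq (K R : List Char) (hK : K ≠ []) :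
    ∀ fuel l, l.length ≤ fuel →
      PySem.Chars.replace.go K R fuel l [] = pvRepl K R l := by
  intro fuel
  induction fuel with
  | zero =>
    intro l hl
    rw [List.eq_nil_of_length_eq_zero (Nat.le_zero.mp hl)]
    simp [PySem.Chars.replace.go, pvRepl_nil]
  | succ g ih =>
    intro l hl
    cases l with
    | nil => simp [PySem.Chars.replace.go, pvRepl_nil]
    | cons c t =>
      have hKlen : 1 ≤ K.length := by
        cases K with | nil => exact absurd rfl hK | cons _ _ => simp
      simp only [PySem.Chars.replace.go]
      rw [pvRepl]
      split
      · rw [pv_replace_go_acc, ih _ (by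
          simp only [List.length_drop, List.length_cons] at *; omega)]
        have hdrop : List.drop K.length (c :: t) = t.drop (K.length - 1) := by
          obtain ⟨m, hm⟩ := Nat.exists_eq_add_of_le hKlen
          rw [hm]; simp [Nat.add_comm 1 m]
        rw [hdrop]
        simp
      · rw [pv_replace_go_acc, ih t (by
          simp only [List.length_cons] at hl; omega)]
        simp

theorem pv_toList_replace (s old new : String) (h : old.toList ≠ []) :
    (PySem.Str.replace s old new).toList = pvRepl old.toList new.toList s.toList := by
  rw [PySem.Str.toList_replace, PySem.Chars.replace]
  have he : old.toList.isEmpty = false := by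
    cases ho : old.toList with
    | nil => exact absurd ho h
    | cons _ _ => simp
  rw [if_neg (by simp [he])]
  exact pv_go_eq old.toList new.toList h s.toList.length s.toList le_rfl

-- the four-pass A side in pvRepl form
theorem pv_A_eq (prompt : String) :
    (enhance_edit_language_py prompt).toList =
      pvRepl "turn it into".toList "convert and reshape into".toList
        (pvRepl "make it".toList "create and render".toList
          (pvRepl "change it".toList "alter the specific elements".toList
            (pvRepl "transform".toList "modify and adjust".toList prompt.toList))) := by
  have hA : enhance_edit_language_py prompt =
      PySem.Str.replace (PySem.Str.replace (PySem.Str.replace (PySem.Str.replace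
        prompt "transform" "modify and adjust") "change it" "alter the specific elements")
        "make it" "create and render") "turn it into" "convert and reshape into" := rfl
  rw [hA, pv_toList_replace _ _ _ (by decide), pv_toList_replace _ _ _ (by decide),
      pv_toList_replace _ _ _ (by decide), pv_toList_replace _ _ _ (by decide)]

-- scan steps
theorem pvScan_m1 (v : List Char) :
    pvScan ("transform".toList ++ v) = "modify and adjust".toList ++ pvScan v := by
  have h1 : ("transform".toList).isPrefixOf ('t' :: ("ransform".toList ++ v)) = true := by
    rw [List.isPrefixOf_iff_prefix]; exact ⟨v, rfl⟩
  rw [show "transform".toList ++ v = 't' :: ("ransform".toList ++ v) from rfl, pvScan]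
  simp only [pvPairs, List.find?, h1]
  simp [List.drop]

theorem pvScan_m2 (v : List Char) :
    pvScan ("change it".toList ++ v) = "alter the specific elements".toList ++ pvScan v := by
  have h2 : ("change it".toList).isPrefixOf ('c' :: ("hange it".toList ++ v)) = true := by
    rw [List.isPrefixOf_iff_prefix]; exact ⟨v, rfl⟩
  rw [show "change it".toList ++ v = 'c' :: ("hange it".toList ++ v) from rfl, pvScan]
  simp only [pvPairs, List.find?, h2]
  simp [List.isPrefixOf, List.drop]

theorem pvScan_m3 (v : List Char) :
    pvScan ("make it".toList ++ v) = "create and render".toList ++ pvScan v := by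
  have h3 : ("make it".toList).isPrefixOf ('m' :: ("ake it".toList ++ v)) = true := by
    rw [List.isPrefixOf_iff_prefix]; exact ⟨v, rfl⟩
  rw [show "make it".toList ++ v = 'm' :: ("ake it".toList ++ v) from rfl, pvScan]
  simp only [pvPairs, List.find?, h3]
  simp [List.isPrefixOf, List.drop]

theorem pvScan_m4 (v : List Char) :
    pvScan ("turn it into".toList ++ v) = "convert and reshape into".toList ++ pvScan v := by
  have h4 : ("turn it into".toList).isPrefixOf ('t' :: ("urn it into".toList ++ v)) = true := by
    rw [List.isPrefixOf_iff_prefix]; exact ⟨v, rfl⟩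
  rw [show "turn it into".toList ++ v = 't' :: ("urn it into".toList ++ v) from rfl, pvScan]
  simp only [pvPairs, List.find?, h4]
  simp [List.isPrefixOf, List.drop]

theorem pvScan_nomatch (c : Char) (t : List Char)
    (h1 : ¬ "transform".toList <+: (c :: t))
    (h2 : ¬ "change it".toList <+: (c :: t))
    (h3 : ¬ "make it".toList <+: (c :: t))
    (h4 : ¬ "turn it into".toList <+: (c :: t)) :
    pvScan (c :: t) = c :: pvScan t := by
  have e1 : ("transform".toList).isPrefixOf (c :: t) = false := by
    rw [← Bool.not_eq_true, List.isPrefixOf_iff_prefix]; exact h1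
  have e2 : ("change it".toList).isPrefixOf (c :: t) = false := by
    rw [← Bool.not_eq_true, List.isPrefixOf_iff_prefix]; exact h2
  have e3 : ("make it".toList).isPrefixOf (c :: t) = false := by
    rw [← Bool.not_eq_true, List.isPrefixOf_iff_prefix]; exact h3
  have e4 : ("turn it into".toList).isPrefixOf (c :: t) = false := by
    rw [← Bool.not_eq_true, List.isPrefixOf_iff_prefix]; exact h4
  rw [pvScan]
  simp only [pvPairs, List.find?, e1, e2, e3, e4]

-- closed facts about the literal terms and replacements (boundary safety)
theorem pv_b_R1K2 : ∀ x₂ ∈ "modify and adjust".toList.tails, x₂ ≠ [] → ¬ x₂ <+: "change it".toList := by decide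
theorem pv_b_R1K3 : ∀ x₂ ∈ "modify and adjust".toList.tails, x₂ ≠ [] → ¬ x₂ <+: "make it".toList := by decide
theorem pv_b_R1K4 : ∀ x₂ ∈ "modify and adjust".toList.tails, x₂ ≠ [] → x₂ <+: "turn it into".toList → x₂ = ['t'] := by decide
theorem pv_b_K2K1 : ∀ x₂ ∈ "change it".toList.tails, x₂ ≠ [] → x₂ <+: "transform".toList → x₂ = ['t'] := by decide
theorem pv_b_K3K1 : ∀ x₂ ∈ "make it".toList.tails, x₂ ≠ [] → x₂ <+: "transform".toList → x₂ = ['t'] := by decide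
theorem pv_b_K3K2 : ∀ x₂ ∈ "make it".toList.tails, x₂ ≠ [] → ¬ x₂ <+: "change it".toList := by decide
theorem pv_b_R2K3 : ∀ x₂ ∈ "alter the specific elements".toList.tails, x₂ ≠ [] → ¬ x₂ <+: "make it".toList := by decide
theorem pv_b_R2K4 : ∀ x₂ ∈ "alter the specific elements".toList.tails, x₂ ≠ [] → ¬ x₂ <+: "turn it into".toList := by decide
theorem pv_b_R3K4 : ∀ x₂ ∈ "create and render".toList.tails, x₂ ≠ [] → ¬ x₂ <+: "turn it into".toList := by decide
theorem pv_b_K4K1 : ∀ x₂ ∈ "turn it into".toList.tails, x₂ ≠ [] → ¬ x₂ <+: "transform".toList := by decide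
theorem pv_b_K4K2 : ∀ x₂ ∈ "turn it into".toList.tails, x₂ ≠ [] → ¬ x₂ <+: "change it".toList := by decide
theorem pv_b_K4K3 : ∀ x₂ ∈ "turn it into".toList.tails, x₂ ≠ [] → ¬ x₂ <+: "make it".toList := by decide
-- no later term occurs inside an earlier block
theorem pv_i_R1K2 : ∀ t ∈ "modify and adjust".toList.tails, ¬ "change it".toList <+: t := by decide
theorem pv_i_R1K3 : ∀ t ∈ "modify and adjust".toList.tails, ¬ "make it".toList <+: t := by decide
theorem pv_i_R1K4 : ∀ t ∈ "modify and adjust".toList.tails, ¬ "turn it into".toList <+: t := by decide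
theorem pv_i_K2K1 : ∀ t ∈ "change it".toList.tails, ¬ "transform".toList <+: t := by decide
theorem pv_i_K3K1 : ∀ t ∈ "make it".toList.tails, ¬ "transform".toList <+: t := by decide
theorem pv_i_K3K2 : ∀ t ∈ "make it".toList.tails, ¬ "change it".toList <+: t := by decide
theorem pv_i_R2K3 : ∀ t ∈ "alter the specific elements".toList.tails, ¬ "make it".toList <+: t := by decide
theorem pv_i_R2K4 : ∀ t ∈ "alter the specific elements".toList.tails, ¬ "turn it into".toList <+: t := by decide
theorem pv_i_R3K4 : ∀ t ∈ "create and render".toList.tails, ¬ "turn it into".toList <+: t := by decide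
theorem pv_i_K4K1 : ∀ t ∈ "turn it into".toList.tails, ¬ "transform".toList <+: t := by decide
theorem pv_i_K4K2 : ∀ t ∈ "turn it into".toList.tails, ¬ "change it".toList <+: t := by decide
theorem pv_i_K4K3 : ∀ t ∈ "turn it into".toList.tails, ¬ "make it".toList <+: t := by decide
-- no suffix of a term remainder can start a replacement block
theorem pv_r_urnR1 : ∀ q ∈ "urn it into".toList.tails, q ≠ [] → ¬ q <+: "modify and adjust".toList := by decide
theorem pv_r_urnR2 : ∀ q ∈ "urn it into".toList.tails, q ≠ [] → ¬ q <+: "alter the specific elements".toList := by decide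
theorem pv_r_urnR3 : ∀ q ∈ "urn it into".toList.tails, q ≠ [] → ¬ q <+: "create and render".toList := by decide
theorem pv_r_hangeR1 : ∀ q ∈ "hange it".toList.tails, q ≠ [] → ¬ q <+: "modify and adjust".toList := by decide
theorem pv_r_akeR1 : ∀ q ∈ "ake it".toList.tails, q ≠ [] → ¬ q <+: "modify and adjust".toList := by decide
theorem pv_r_akeR2 : ∀ q ∈ "ake it".toList.tails, q ≠ [] → ¬ q <+: "alter the specific elements".toList := by decide

-- the excluded-corner condition on the char-list side
def pvPre (l : List Char) : Prop :=
  ¬ ("change itransform".toList <:+: l) ∧ ¬ ("make itransform".toList <:+: l) ∧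
  ¬ ("transformurn it into".toList <:+: l)

theorem pvPre_suffix {l v : List Char} (h : pvPre l) (hv : v <:+ l) : pvPre v :=
  ⟨fun hi => h.1 (hi.trans hv.isInfix), fun hi => h.2.1 (hi.trans hv.isInfix),
   fun hi => h.2.2 (hi.trans hv.isInfix)⟩

theorem pv_selftail (l : List Char) : l ∈ l.tails :=
  (List.mem_tails _ _).mpr (List.suffix_refl _)

-- hC-shaped consequences of the closed facts
theorem pv_hC_of_noPrefix {K u : List Char} (y : List Char)
    (h : ∀ x₂ ∈ u.tails, x₂ ≠ [] → ¬ x₂ <+: K) :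
    ∀ x₂ ∈ u.tails, x₂ ≠ [] → x₂ <+: K →
      K.length ≤ x₂.length ∨ ¬ (K.drop x₂.length <+: y) :=
  fun x₂ hx₂ hne hp => absurd hp (h x₂ hx₂ hne)

-- main: under pvPre the four-pass pipeline is the one-pass scan
theorem pv_main : ∀ n l, l.length ≤ n → pvPre l →
    pvRepl "turn it into".toList "convert and reshape into".toList
      (pvRepl "make it".toList "create and render".toList
        (pvRepl "change it".toList "alter the specific elements".toList
          (pvRepl "transform".toList "modify and adjust".toList l))) = pvScan l := by
  intro n
  induction n with
  | zero =>
    intro l hl _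
    rw [List.eq_nil_of_length_eq_zero (Nat.le_zero.mp hl)]
    simp [pvRepl_nil, pvScan]
  | succ n ih =>
    intro l hl hpre
    by_cases hk1 : "transform".toList <+: l
    · -- the first term matches at the head
      obtain ⟨v, rfl⟩ := hk1
      have hvpre : pvPre v := pvPre_suffix hpre ⟨_, rfl⟩
      have hvlen : v.length ≤ n := by
        rw [List.length_append] at hl
        have : "transform".toList.length = 9 := by decide
        omega
      have hv3 : ¬ ("urn it into".toList <+: v) := by
        intro hv
        exact hpre.2.2 (List.IsPrefix.isInfix (by
          rw [show ("transformurn it into".toList : List Char)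
              = "transform".toList ++ "urn it into".toList from rfl]
          exact (List.prefix_append_right_inj _).mpr hv))
      rw [pvRepl_pos _ _ _ (by decide)]
      rw [pvRepl_append _ _ (by decide) "modify and adjust".toList.length
            "modify and adjust".toList _ le_rfl (pv_hC_of_noPrefix _ pv_b_R1K2),
          pvRepl_id _ _ _ pv_i_R1K2]
      rw [pvRepl_append _ _ (by decide) "modify and adjust".toList.length
            "modify and adjust".toList _ le_rfl (pv_hC_of_noPrefix _ pv_b_R1K3),
          pvRepl_id _ _ _ pv_i_R1K3]
      rw [pvRepl_append "turn it into".toList _ (by decide)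
            "modify and adjust".toList.length "modify and adjust".toList _ le_rfl ?_,
          pvRepl_id _ _ _ pv_i_R1K4]
      · rw [ih v hvlen hvpre, pvScan_m1]
      · intro x₂ hx₂ hne hp
        right
        rw [pv_b_R1K4 x₂ hx₂ hne hp]
        intro hdrop
        exact hv3
          (pvRepl_reflect "transform".toList "modify and adjust".toList
            "urn it into".toList (by decide) pv_r_urnR1 (by decide) _ _ _ le_rfl
            (pv_selftail _)
            (pvRepl_reflect "change it".toList "alter the specific elements".toList
              "urn it into".toList (by decide) pv_r_urnR2 (by decide) _ _ _ le_rfl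
              (pv_selftail _)
              (pvRepl_reflect "make it".toList "create and render".toList
                "urn it into".toList (by decide) pv_r_urnR3 (by decide) _ _ _ le_rfl
                (pv_selftail _) hdrop)))
    · by_cases hk2 : "change it".toList <+: l
      · -- the second term matches at the head
        obtain ⟨v, rfl⟩ := hk2
        have hvpre : pvPre v := pvPre_suffix hpre ⟨_, rfl⟩
        have hvlen : v.length ≤ n := by
          rw [List.length_append] at hl
          have : "change it".toList.length = 9 := by decide
          omega
        have hv1 : ¬ ("ransform".toList <+: v) := by
          intro hv
          exact hpre.1 (List.IsPrefix.isInfix (by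
            rw [show ("change itransform".toList : List Char)
                = "change it".toList ++ "ransform".toList from rfl]
            exact (List.prefix_append_right_inj _).mpr hv))
        rw [pvRepl_append "transform".toList _ (by decide)
              "change it".toList.length "change it".toList v le_rfl ?_,
            pvRepl_id _ _ _ pv_i_K2K1]
        · rw [pvRepl_pos _ _ _ (by decide)]
          rw [pvRepl_append _ _ (by decide) "alter the specific elements".toList.length
                "alter the specific elements".toList _ le_rfl (pv_hC_of_noPrefix _ pv_b_R2K3),
              pvRepl_id _ _ _ pv_i_R2K3]
          rw [pvRepl_append _ _ (by decide) "alter the specific elements".toList.length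
                "alter the specific elements".toList _ le_rfl (pv_hC_of_noPrefix _ pv_b_R2K4),
              pvRepl_id _ _ _ pv_i_R2K4]
          rw [ih v hvlen hvpre, pvScan_m2]
        · intro x₂ hx₂ hne hp
          right
          rw [pv_b_K2K1 x₂ hx₂ hne hp]
          exact fun hdrop => hv1 hdrop
      · by_cases hk3 : "make it".toList <+: l
        · -- the third term matches at the head
          obtain ⟨v, rfl⟩ := hk3
          have hvpre : pvPre v := pvPre_suffix hpre ⟨_, rfl⟩
          have hvlen : v.length ≤ n := by
            rw [List.length_append] at hl
            have : "make it".toList.length = 7 := by decide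
            omega
          have hv2 : ¬ ("ransform".toList <+: v) := by
            intro hv
            exact hpre.2.1 (List.IsPrefix.isInfix (by
              rw [show ("make itransform".toList : List Char)
                  = "make it".toList ++ "ransform".toList from rfl]
              exact (List.prefix_append_right_inj _).mpr hv))
          rw [pvRepl_append "transform".toList _ (by decide)
                "make it".toList.length "make it".toList v le_rfl ?_,
              pvRepl_id _ _ _ pv_i_K3K1]
          · rw [pvRepl_append "change it".toList _ (by decide)
                  "make it".toList.length "make it".toList _ le_rfl
                  (pv_hC_of_noPrefix _ pv_b_K3K2),
                pvRepl_id _ _ _ pv_i_K3K2]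
            rw [pvRepl_pos _ _ _ (by decide)]
            rw [pvRepl_append _ _ (by decide) "create and render".toList.length
                  "create and render".toList _ le_rfl (pv_hC_of_noPrefix _ pv_b_R3K4),
                pvRepl_id _ _ _ pv_i_R3K4]
            rw [ih v hvlen hvpre, pvScan_m3]
          · intro x₂ hx₂ hne hp
            right
            rw [pv_b_K3K1 x₂ hx₂ hne hp]
            exact fun hdrop => hv2 hdrop
        · by_cases hk4 : "turn it into".toList <+: l
          · -- the fourth term matches at the head
            obtain ⟨v, rfl⟩ := hk4
            have hvpre : pvPre v := pvPre_suffix hpre ⟨_, rfl⟩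
            have hvlen : v.length ≤ n := by
              rw [List.length_append] at hl
              have : "turn it into".toList.length = 12 := by decide
              omega
            rw [pvRepl_append "transform".toList _ (by decide)
                  "turn it into".toList.length "turn it into".toList v le_rfl
                  (pv_hC_of_noPrefix _ pv_b_K4K1),
                pvRepl_id _ _ _ pv_i_K4K1]
            rw [pvRepl_append "change it".toList _ (by decide)
                  "turn it into".toList.length "turn it into".toList _ le_rfl
                  (pv_hC_of_noPrefix _ pv_b_K4K2),
                pvRepl_id _ _ _ pv_i_K4K2]
            rw [pvRepl_append "make it".toList _ (by decide)
                  "turn it into".toList.length "turn it into".toList _ le_rfl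
                  (pv_hC_of_noPrefix _ pv_b_K4K3),
                pvRepl_id _ _ _ pv_i_K4K3]
            rw [pvRepl_pos _ _ _ (by decide)]
            rw [ih v hvlen hvpre, pvScan_m4]
          · -- no term matches at the head
            cases l with
            | nil => simp [pvRepl_nil, pvScan]
            | cons c t =>
              have htlen : t.length ≤ n := by
                simp only [List.length_cons] at hl; omega
              have htpre : pvPre t := pvPre_suffix hpre (List.suffix_cons c t)
              rw [pvRepl_neg _ _ _ _ hk1]
              rw [pvRepl_neg "change it".toList _ c _ (by
                intro hq
                have hc : ("change it".toList : List Char) = 'c' :: "hange it".toList := rfl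
                rw [hc, List.cons_prefix_cons] at hq
                have hrt : ("hange it".toList : List Char) <+: t :=
                  pvRepl_reflect _ _ "hange it".toList (by decide) pv_r_hangeR1
                    (by decide) t.length _ _ le_rfl (pv_selftail _) hq.2
                exact hk2 (by rw [hc]; exact List.cons_prefix_cons.mpr ⟨hq.1, hrt⟩))]
              rw [pvRepl_neg "make it".toList _ c _ (by
                intro hq
                have hc : ("make it".toList : List Char) = 'm' :: "ake it".toList := rfl
                rw [hc, List.cons_prefix_cons] at hq
                have s2 : ("ake it".toList : List Char) <+:
                    pvRepl "transform".toList "modify and adjust".toList t :=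
                  pvRepl_reflect _ _ "ake it".toList (by decide) pv_r_akeR2
                    (by decide) _ _ _ le_rfl (pv_selftail _) hq.2
                have hrt : ("ake it".toList : List Char) <+: t :=
                  pvRepl_reflect _ _ "ake it".toList (by decide) pv_r_akeR1
                    (by decide) t.length _ _ le_rfl (pv_selftail _) s2
                exact hk3 (by rw [hc]; exact List.cons_prefix_cons.mpr ⟨hq.1, hrt⟩))]
              rw [pvRepl_neg "turn it into".toList _ c _ (by
                intro hq
                have hc : ("turn it into".toList : List Char) = 't' :: "urn it into".toList := rfl
                rw [hc, List.cons_prefix_cons] at hq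
                have s3 : ("urn it into".toList : List Char) <+:
                    pvRepl "change it".toList "alter the specific elements".toList
                      (pvRepl "transform".toList "modify and adjust".toList t) :=
                  pvRepl_reflect _ _ "urn it into".toList (by decide) pv_r_urnR3
                    (by decide) _ _ _ le_rfl (pv_selftail _) hq.2
                have s2 : ("urn it into".toList : List Char) <+:
                    pvRepl "transform".toList "modify and adjust".toList t :=
                  pvRepl_reflect _ _ "urn it into".toList (by decide) pv_r_urnR2
                    (by decide) _ _ _ le_rfl (pv_selftail _) s3
                have hrt : ("urn it into".toList : List Char) <+: t :=
                  pvRepl_reflect _ _ "urn it into".toList (by decide) pv_r_urnR1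
                    (by decide) t.length _ _ le_rfl (pv_selftail _) s2
                exact hk4 (by rw [hc]; exact List.cons_prefix_cons.mpr ⟨hq.1, hrt⟩))]
              rw [ih t htlen htpre, pvScan_nomatch c t hk1 hk2 hk3 hk4]

-- ===== VERDICT (by name: the statement is the Claim_ definition above) =====
theorem enhance_edit_language_py_spec : Claim_equal_enhance_edit_language_py := by
  intro prompt _ hpre
  unfold Spec_enhance_edit_language_py enhance_edit_language_py_alt
  have hmain := pv_main prompt.toList.length prompt.toList le_rfl
    ⟨hpre.1, hpre.2.1, hpre.2.2⟩
  calc enhance_edit_language_py prompt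
      = String.ofList (enhance_edit_language_py prompt).toList :=
        String.ofList_toList.symm
    _ = String.ofList (pvScan prompt.toList) := by rw [pv_A_eq, hmain]
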